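-- pv_equiv track=rewrite | github.com/SadafAsad/Linear-Algebra | permutation matrix sqrt/permutationMatrixSquareRoot.py | hasSquareRoot
-- ===== SOURCE A (Python) =====
-- def hasSquareRoot(cycle_list):
--     n = len(cycle_list)
--     for i in range(n):
--         x = len(cycle_list[i])
--         counter = 0
--         if x%2==0:
--             for r in range(n):
--                 if x==len(cycle_list[r]):
--                     counter+=1
--         if counter%2==1:
--             return 0
--     return 1
-- ===== SOURCE B (Python) =====
-- def hasSquareRoot(cycle_list):
--     counts = {}
--     for c in cycle_list:
--         l = len(c)
--         counts[l] = counts.get(l, 0) + 1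
--     for l, cnt in counts.items():
--         if l % 2 == 0 and cnt % 2 == 1:
--             return 0
--     return 1
-- ===== Notes on version B (the rewrite author's own statement) =====
-- stated objective: alternative
-- what changed: Replaced the nested per-cycle rescan of the whole list by a single pass building a length->count dict, then one scan over the distinct lengths checking that even lengths have even counts.
import Mathlib
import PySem

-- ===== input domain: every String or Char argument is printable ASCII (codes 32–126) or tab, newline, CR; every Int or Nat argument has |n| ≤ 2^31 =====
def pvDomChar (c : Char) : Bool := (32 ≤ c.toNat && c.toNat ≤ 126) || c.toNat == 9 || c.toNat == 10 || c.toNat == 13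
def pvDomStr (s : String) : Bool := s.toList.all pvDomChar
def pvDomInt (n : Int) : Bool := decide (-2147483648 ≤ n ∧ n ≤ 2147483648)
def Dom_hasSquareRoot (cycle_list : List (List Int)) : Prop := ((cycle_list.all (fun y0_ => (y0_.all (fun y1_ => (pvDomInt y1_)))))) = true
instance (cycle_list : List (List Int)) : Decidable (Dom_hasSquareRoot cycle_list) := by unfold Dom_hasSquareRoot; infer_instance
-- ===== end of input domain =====

-- B counts cycle lengths in one dict pass and then scans the distinct lengths, instead of A's per-cycle rescan of the whole list.

-- ===== PORT A =====
-- inner 'for r in range(n): if x==len(cycle_list[r]): counter+=1'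
def hasSquareRootInner (cycle_list : List (List Int)) (x : Int) : Int :=
  cycle_list.foldl (fun counter r => if x == (r.length : Int) then counter + 1 else counter) 0

-- outer 'for i in range(n)' loop, recursing over the remaining cycles (early return 0)
def hasSquareRootGo (cycle_list : List (List Int)) : List (List Int) → Int
  | [] => 1
  | c :: rest =>
    let x : Int := c.length
    let counter : Int := if x % 2 == 0 then hasSquareRootInner cycle_list x else 0
    if counter % 2 == 1 then 0 else hasSquareRootGo cycle_list rest

def hasSquareRoot (cycle_list : List (List Int)) : Int :=
  hasSquareRootGo cycle_list cycle_list

-- ===== PORT B =====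
-- second loop 'for l, cnt in counts.items()' (early return 0)
def hasSquareRootAltGo : List (Int × Int) → Int
  | [] => 1
  | (l, cnt) :: rest => if l % 2 == 0 && cnt % 2 == 1 then 0 else hasSquareRootAltGo rest

def hasSquareRoot_alt (cycle_list : List (List Int)) : Int :=
  let counts : PySem.Dict Int Int :=
    cycle_list.foldl (fun d c => d.insert (c.length : Int) (d.getD (c.length : Int) 0 + 1)) PySem.Dict.empty
  hasSquareRootAltGo counts.items

-- ===== PRECONDITION & SPEC =====
def Spec_hasSquareRoot (cycle_list : List (List Int)) (out : Int) : Prop := out = hasSquareRoot_alt cycle_list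
instance (cycle_list : List (List Int)) (out : Int) : Decidable (Spec_hasSquareRoot cycle_list out) := by unfold Spec_hasSquareRoot; infer_instance

-- ===== CLAIM (what is proved, stated in full; the proofs are below) =====
def Claim_equal_hasSquareRoot : Prop := ∀ (cycle_list : List (List Int)), Dom_hasSquareRoot cycle_list → Spec_hasSquareRoot cycle_list (hasSquareRoot cycle_list)

-- ===== LEMMAS AND PROOFS =====

-- the shared "bad" predicate: an even length occurring an odd number of times
def badLen (lens : List Int) (l : Int) : Bool := l % 2 == 0 && (lens.count l : Int) % 2 == 1

theorem inner_eq_count (cl : List (List Int)) (x : Int) :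
    hasSquareRootInner cl x = ((cl.map (fun c => (c.length : Int))).count x : Int) := by
  unfold hasSquareRootInner
  induction cl with
  | nil => simp
  | cons c rest ih =>
    rw [List.foldl_cons]
    have h : ∀ (a : Int) (l : List (List Int)),
        l.foldl (fun counter r => if x == (r.length : Int) then counter + 1 else counter) a
          = a + l.foldl (fun counter r => if x == (r.length : Int) then counter + 1 else counter) 0 := by
      intro a l
      induction l generalizing a with
      | nil => simp
      | cons y ys ihl =>
        simp only [List.foldl_cons]
        rw [ihl, ihl (if x == (y.length : Int) then 0 + 1 else 0)]
        split <;> ring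
    rw [h]
    simp only [List.map_cons, List.count_cons]
    rw [ih]
    by_cases hx : x = (c.length : Int)
    · simp [hx]; ring
    · have : ((c.length : Int) == x) = false := by simp [Ne.symm hx]
      simp [hx, Ne.symm hx]

theorem goA_eq (cl rest : List (List Int)) :
    hasSquareRootGo cl rest
      = if rest.any (fun c => badLen (cl.map (fun c => (c.length : Int))) (c.length : Int)) then 0 else 1 := by
  induction rest with
  | nil => simp [hasSquareRootGo]
  | cons c rs ih =>
    simp only [hasSquareRootGo, List.any_cons]
    rw [inner_eq_count, ih]
    by_cases he : (c.length : Int) % 2 == 0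
    · simp only [he, badLen]
      by_cases ho : ((cl.map (fun c => (c.length : Int))).count (c.length : Int) : Int) % 2 == 1
      · simp [ho]
      · simp [ho]
    · have : badLen (cl.map (fun c => (c.length : Int))) (c.length : Int) = false := by
        simp [badLen]; intro h; simp_all
      simp [he, this]

theorem goB_eq (items : List (Int × Int)) :
    hasSquareRootAltGo items
      = if items.any (fun p => p.1 % 2 == 0 && p.2 % 2 == 1) then 0 else 1 := by
  induction items with
  | nil => simp [hasSquareRootAltGo]
  | cons p rs ih =>
    obtain ⟨l, cnt⟩ := p
    simp only [hasSquareRootAltGo, List.any_cons]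
    rw [ih]
    by_cases h : (l % 2 == 0 && cnt % 2 == 1) = true
    · simp [h]
    · simp only [Bool.not_eq_true] at h
      simp only [h, Bool.false_or]
      simp

theorem altB_eq (cl : List (List Int)) :
    hasSquareRoot_alt cl
      = if (PySem.Set.ofList (cl.map (fun c => (c.length : Int)))).any
            (fun l => badLen (cl.map (fun c => (c.length : Int))) l) then 0 else 1 := by
  unfold hasSquareRoot_alt
  have hfold : cl.foldl (fun d c => d.insert (c.length : Int) (d.getD (c.length : Int) 0 + 1)) PySem.Dict.empty
      = PySem.Dict.counter (cl.map (fun c => (c.length : Int))) := by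
    rw [← PySem.Dict.foldl_insert_getD_add_one_eq_counter, List.foldl_map]
  rw [hfold, goB_eq, PySem.Dict.items_counter, List.any_map]
  rfl

theorem hasSquareRoot_spec' (cl : List (List Int)) : hasSquareRoot cl = hasSquareRoot_alt cl := by
  rw [hasSquareRoot, goA_eq, altB_eq]
  have hb : (cl.any fun c => badLen (cl.map (fun c => (c.length : Int))) (c.length : Int))
      = ((PySem.Set.ofList (cl.map (fun c => (c.length : Int)))).any
          (fun l => badLen (cl.map (fun c => (c.length : Int))) l)) := by
    rw [Bool.eq_iff_iff]
    simp only [List.any_eq_true]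
    constructor
    · rintro ⟨c, hc, h⟩
      exact ⟨(c.length : Int), (PySem.Set.mem_ofList _ _).2 (List.mem_map_of_mem hc), h⟩
    · rintro ⟨l, hl, h⟩
      obtain ⟨c, hc, rfl⟩ := List.mem_map.1 ((PySem.Set.mem_ofList _ _).1 hl)
      exact ⟨c, hc, h⟩
  rw [hb]

-- ===== VERDICT (by name: the statement is the Claim_ definition above) =====
theorem hasSquareRoot_spec : Claim_equal_hasSquareRoot := by
  intro cl _
  unfold Spec_hasSquareRoot
  exact hasSquareRoot_spec' cl
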